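-- pv_equiv track=rewrite | github.com/dbconfession78/interview_prep | leetcode/541_reverse_string_2.py | reverseStr_PASSED
-- ===== SOURCE A (Python) =====
-- def reverseStr_PASSED(s, k):
-- # def reverseStr(self, s, k):
--     """
--     :type s: str
--     :type k: int
--     :rtype: str
--     """
--     # reverse the first k characters for every 2k characters
--     _len = len(s)
--     if _len == 1:
--         return s
--     s = list(s)
--     i = 0
--     rng = k * 2
--     while i < len(s):
--         rem = len(s) - i
--         if rem < k:
--             for j in range(rem):
--                 s.insert(i+j, s.pop(-1))
--         elif rem < rng and rem >= k:
--             for j in range(k):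
--                 s.insert(i+j, s.pop(i+(k-1)))
--         else:
--             for j in range(k):
--                 s.insert(i+j, s.pop(i+(k-1)))
--         i += rng
--     return ''.join(s)
-- ===== SOURCE B (Python) =====
-- def reverseStr_PASSED(s, k):
--     # Index-mapping: each output position pulls its character straight from
--     # the source index, no block reversal or mutation.
--     n = len(s)
--     if n <= 1:
--         return s
--     rng = 2 * k
--     out = []
--     for i in range(n):
--         b = (i // rng) * rng      # start of i's 2k-block
--         r = min(k, n - b)         # length of the reversed span in this block
--         o = i - b                 # offset inside the block
--         out.append(s[b + r - 1 - o] if o < r else s[i])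
--     return ''.join(out)
-- ===== Notes on version B (the rewrite author's own statement) =====
-- stated objective: faster
-- what changed: Replaces A's in-place block reversal done with repeated list.pop/list.insert inside a 2k-stepping while loop by a single pass that computes, for every output index, the source index it must come from (block start, reverse span, offset) and assembles the result directly.
import Mathlib
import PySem

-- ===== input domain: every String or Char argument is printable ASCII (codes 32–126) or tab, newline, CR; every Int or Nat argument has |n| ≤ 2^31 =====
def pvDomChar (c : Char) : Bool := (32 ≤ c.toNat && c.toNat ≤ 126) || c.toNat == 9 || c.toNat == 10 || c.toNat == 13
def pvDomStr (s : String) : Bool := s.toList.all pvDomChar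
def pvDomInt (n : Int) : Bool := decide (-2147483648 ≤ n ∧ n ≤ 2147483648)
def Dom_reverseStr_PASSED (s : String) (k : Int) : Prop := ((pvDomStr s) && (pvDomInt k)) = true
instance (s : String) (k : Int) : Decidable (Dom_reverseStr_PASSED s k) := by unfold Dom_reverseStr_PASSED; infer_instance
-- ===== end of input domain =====

-- B replaces A's in-place pop/insert block reversal by a one-pass index mapping; proved equal on Pre_ (A loops forever for k ≤ 0 with length ≥ 2).

-- ===== PORT A =====
-- for j in range(rem): s.insert(i+j, s.pop(-1))
def revA_body1 (s : List Char) (i rem : Int) : List Char :=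
  (PySem.List.pyRange 0 rem 1).foldl (fun s j =>
    match PySem.List.pop? s (-1) with
    | some (v, s') => PySem.List.insert s' (i + j) v
    | none => s) s

-- for j in range(k): s.insert(i+j, s.pop(i+(k-1)))
def revA_body2 (s : List Char) (i k : Int) : List Char :=
  (PySem.List.pyRange 0 k 1).foldl (fun s j =>
    match PySem.List.pop? s (i + (k - 1)) with
    | some (v, s') => PySem.List.insert s' (i + j) v
    | none => s) s

-- the while loop; fuel bounds the iteration count (each step advances i by rng ≥ 2 inside Pre_)
def revA_loop (fuel : Nat) (s : List Char) (i k rng : Int) : List Char :=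
  match fuel with
  | 0 => s
  | f + 1 =>
    if i < (s.length : Int) then
      -- rem = len(s) - i
      revA_loop f
        (if (s.length : Int) - i < k then revA_body1 s i ((s.length : Int) - i)
         else if (s.length : Int) - i < rng ∧ k ≤ (s.length : Int) - i then revA_body2 s i k
         else revA_body2 s i k)
        (i + rng) k rng
    else s

def reverseStr_PASSED (s : String) (k : Int) : String :=
  if PySem.Str.len s = 1 then s
  else String.ofList (revA_loop (s.toList.length + 1) s.toList 0 k (k * 2))

-- ===== PORT B =====
def reverseStr_PASSED_alt (s : String) (k : Int) : String :=
  let n := PySem.Str.len s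
  if n ≤ 1 then s
  else
    let l := s.toList
    let rng := 2 * k
    String.ofList ((PySem.List.pyRange 0 n 1).map (fun i =>
      let b := PySem.Int.floordiv i rng * rng
      let r := min k (n - b)
      let o := i - b
      if o < r then PySem.List.pyGetD l (b + r - 1 - o) ' '
      else PySem.List.pyGetD l i ' '))

-- ===== PRECONDITION & SPEC =====
-- Pre_ excludes k ≤ 0 together with len(s) ≥ 2: there A's while loop never advances past len(s)
-- (i += 2*k with 2*k ≤ 0) and A loops forever, returning nothing.
def Pre_reverseStr_PASSED (s : String) (k : Int) : Prop := 1 ≤ k ∨ s.toList.length ≤ 1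
instance (s : String) (k : Int) : Decidable (Pre_reverseStr_PASSED s k) := by unfold Pre_reverseStr_PASSED; infer_instance
def pvWitness_reverseStr_PASSED : String × Int := ("abcdefg", 2)

def Spec_reverseStr_PASSED (s : String) (k : Int) (out : String) : Prop := out = reverseStr_PASSED_alt s k
instance (s : String) (k : Int) (out : String) : Decidable (Spec_reverseStr_PASSED s k out) := by unfold Spec_reverseStr_PASSED; infer_instance

-- ===== CLAIM (what is proved, stated in full; the proofs are below) =====
def Claim_equal_reverseStr_PASSED : Prop := ∀ (s : String) (k : Int), Dom_reverseStr_PASSED s k → Pre_reverseStr_PASSED s k → Spec_reverseStr_PASSED s k (reverseStr_PASSED s k)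

-- ===== LEMMAS AND PROOFS =====

def pvChunks (k : Nat) (l : List Char) : List Char :=
  if _hk : k = 0 then l
  else if _hl : l = [] then []
  else (l.take k).reverse ++ ((l.drop k).take k) ++ pvChunks k (l.drop (2 * k))
termination_by l.length
decreasing_by
  simp only [List.length_drop]
  have : 0 < l.length := List.length_pos_iff.mpr (by assumption)
  omega


theorem pv_chunks_nil (k : Nat) : pvChunks k [] = [] := by
  rw [pvChunks]
  split_ifs with h1 h2
  · rfl
  · rfl
  · exact absurd rfl h2

theorem pv_chunks_cons (k : Nat) (l : List Char) (hk : k ≠ 0) (hl : l ≠ []) :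
    pvChunks k l = (l.take k).reverse ++ ((l.drop k).take k) ++ pvChunks k (l.drop (2 * k)) := by
  rw [pvChunks]; split_ifs <;> tauto

theorem pv_rot2 (pre rest : List Char) :
    ∀ (B acc : List Char) (q : Int), q = (pre.length : Int) + acc.length + B.length - 1 →
    (PySem.List.pyRange (acc.length) ((acc.length : Int) + B.length) 1).foldl
      (fun s j => match PySem.List.pop? s q with
        | some (v, s') => PySem.List.insert s' ((pre.length : Int) + j) v
        | none => s)
      (pre ++ acc ++ B ++ rest)
    = pre ++ acc ++ B.reverse ++ rest := by
  intro B
  induction B using List.reverseRecOn with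
  | nil =>
    intro acc q hq
    rw [PySem.List.pyRange_one_eq_nil (by simp)]
    simp
  | append_singleton B' x ih =>
    intro acc q hq
    simp only [List.length_append, List.length_cons, List.length_nil, Nat.cast_add,
      Nat.cast_one, zero_add] at hq
    rw [PySem.List.pyRange_one_cons
      (show (acc.length : Int) < (acc.length : Int) + ((B' ++ [x]).length : Int) by simp; try omega)]
    rw [List.foldl_cons]
    have hq' : q = (((pre ++ acc ++ B').length : Nat) : Int) := by simp; try omega
    have hpop : PySem.List.pop? (pre ++ acc ++ (B' ++ [x]) ++ rest) q
        = some (x, (pre ++ acc) ++ (B' ++ rest)) := by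
      rw [hq']
      have hsplit : pre ++ acc ++ (B' ++ [x]) ++ rest = (pre ++ acc ++ B') ++ x :: rest := by
        simp [List.append_assoc]
      rw [hsplit, PySem.List.pop?_natCast _ _ (by simp)]
      congr 1
      refine Prod.ext ?_ ?_
      · simp
      · show ((pre ++ acc ++ B') ++ x :: rest).eraseIdx (pre ++ acc ++ B').length = _
        rw [List.eraseIdx_append_of_length_le (le_refl _)]
        simp [List.append_assoc]
    rw [hpop]
    dsimp only
    have hins : PySem.List.insert ((pre ++ acc) ++ (B' ++ rest)) ((pre.length : Int) + acc.length) x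
        = pre ++ (acc ++ [x]) ++ B' ++ rest := by
      have h2 : ((pre.length : Int) + acc.length) = (((pre ++ acc).length : Nat) : Int) := by
        simp
      rw [h2, PySem.List.insert_natCast _ _ _ (by simp)]
      rw [List.take_left, List.drop_left]
      simp [List.append_assoc]
    rw [hins]
    have hrng : PySem.List.pyRange ((acc.length : Int) + 1) ((acc.length : Int) + ((B' ++ [x]).length : Int)) 1
        = PySem.List.pyRange ((acc ++ [x]).length) (((acc ++ [x]).length : Int) + B'.length) 1 := by
      congr 1 <;> simp <;> try omega
    rw [hrng]
    rw [ih (acc ++ [x]) q (by simp; try omega)]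
    simp [List.append_assoc]


theorem pv_rot1 (pre : List Char) :
    ∀ (B acc : List Char),
    (PySem.List.pyRange (acc.length) ((acc.length : Int) + B.length) 1).foldl
      (fun s j => match PySem.List.pop? s (-1) with
        | some (v, s') => PySem.List.insert s' ((pre.length : Int) + j) v
        | none => s)
      (pre ++ acc ++ B)
    = pre ++ acc ++ B.reverse := by
  intro B
  induction B using List.reverseRecOn with
  | nil =>
    intro acc
    rw [PySem.List.pyRange_one_eq_nil (by simp)]
    simp
  | append_singleton B' x ih =>
    intro acc
    rw [PySem.List.pyRange_one_cons
      (show (acc.length : Int) < (acc.length : Int) + ((B' ++ [x]).length : Int) by simp; try omega)]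
    rw [List.foldl_cons]
    have hpop : PySem.List.pop? (pre ++ acc ++ (B' ++ [x])) (-1)
        = some (x, (pre ++ acc) ++ B') := by
      have hsplit : pre ++ acc ++ (B' ++ [x]) = ((pre ++ acc) ++ B') ++ [x] := by
        simp [List.append_assoc]
      rw [hsplit, PySem.List.pop?_last]
    rw [hpop]
    dsimp only
    have hins : PySem.List.insert ((pre ++ acc) ++ B') ((pre.length : Int) + acc.length) x
        = pre ++ (acc ++ [x]) ++ B' := by
      have h2 : ((pre.length : Int) + acc.length) = (((pre ++ acc).length : Nat) : Int) := by
        simp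
      rw [h2, PySem.List.insert_natCast _ _ _ (by simp)]
      rw [List.take_left, List.drop_left]
      simp [List.append_assoc]
    rw [hins]
    have hrng : PySem.List.pyRange ((acc.length : Int) + 1) ((acc.length : Int) + ((B' ++ [x]).length : Int)) 1
        = PySem.List.pyRange ((acc ++ [x]).length) (((acc ++ [x]).length : Int) + B'.length) 1 := by
      congr 1 <;> simp <;> try omega
    rw [hrng]
    rw [ih (acc ++ [x])]
    simp [List.append_assoc]

theorem pv_body2_eq (l : List Char) (i k : Nat) (hk : 1 ≤ k) (hik : i + k ≤ l.length) :
    revA_body2 l (i : Int) (k : Int) =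
      l.take i ++ ((l.drop i).take k).reverse ++ l.drop (i + k) := by
  have hpre : (l.take i).length = i := by simp; omega
  have hB : ((l.drop i).take k).length = k := by simp; omega
  have hdd : l.drop (i + k) = (l.drop i).drop k := by rw [List.drop_drop, Nat.add_comm]
  have hl : l.take i ++ (l.drop i).take k ++ l.drop (i + k) = l := by
    rw [hdd, List.append_assoc, List.take_append_drop, List.take_append_drop]
  have h := pv_rot2 (l.take i) (l.drop (i + k)) ((l.drop i).take k) []
    ((i : Int) + ((k : Int) - 1)) (by simp only [List.length_nil, hpre, hB]; push_cast; omega)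
  simp only [List.length_nil, Nat.cast_zero, zero_add, List.append_nil, hpre, hB] at h
  rw [hl] at h
  unfold revA_body2
  exact h

theorem pv_body1_eq (l : List Char) (i : Nat) (hi : i ≤ l.length) :
    revA_body1 l (i : Int) ((l.length : Int) - (i : Int)) =
      l.take i ++ (l.drop i).reverse := by
  have hpre : (l.take i).length = i := by simp; omega
  have hB : (l.drop i).length = l.length - i := by simp
  have hl : l.take i ++ l.drop i = l := List.take_append_drop i l
  have h := pv_rot1 (l.take i) (l.drop i) []
  simp only [List.length_nil, Nat.cast_zero, zero_add, List.append_nil, hpre, hB] at h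
  rw [hl] at h
  unfold revA_body1
  rw [show (l.length : Int) - (i : Int) = ((l.length - i : Nat) : Int) from by push_cast; omega]
  exact h

theorem pv_chunks_small (k : Nat) (l : List Char) (hk : k ≠ 0) (h : l.length ≤ k) :
    pvChunks k l = l.reverse := by
  rw [pvChunks]
  split_ifs with h1 h2
  · exact absurd h1 hk
  · simp [h2]
  · rw [List.take_of_length_le h, List.drop_eq_nil_of_le h,
      List.drop_eq_nil_of_le (by omega), pv_chunks_nil]
    simp

theorem pv_loopA_eq (k : Nat) (hk : 1 ≤ k) :
    ∀ (fuel : Nat) (l : List Char) (i : Nat), l.length ≤ i + fuel →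
    revA_loop fuel l (i : Int) (k : Int) ((k : Int) * 2) =
      l.take i ++ pvChunks k (l.drop i) := by
  intro fuel
  induction fuel with
  | zero =>
    intro l i h
    have hle : l.length ≤ i := by omega
    rw [revA_loop, List.take_of_length_le hle, List.drop_eq_nil_of_le hle, pv_chunks_nil]
    simp
  | succ f ih =>
    intro l i h
    rw [revA_loop]
    by_cases hin : (i : Int) < (l.length : Int)
    · rw [if_pos hin]
      have hi : i < l.length := by exact_mod_cast hin
      by_cases h1 : (l.length : Int) - (i : Int) < (k : Int)
      · rw [if_pos h1]
        have hremk : l.length < i + k := by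
          have := h1; push_cast at this; omega
        rw [pv_body1_eq l i (le_of_lt hi)]
        have hcast : (i : Int) + (k : Int) * 2 = ((i + k * 2 : Nat) : Int) := by push_cast; ring
        rw [hcast]
        have hlen' : (l.take i ++ (l.drop i).reverse).length = l.length := by
          simp; omega
        rw [ih _ (i + k * 2) (by omega)]
        have hbig : (l.take i ++ (l.drop i).reverse).length ≤ i + k * 2 := by omega
        rw [List.take_of_length_le hbig, List.drop_eq_nil_of_le hbig, pv_chunks_nil]
        rw [pv_chunks_small k (l.drop i) (by omega) (by simp; omega)]
        simp
      · rw [if_neg h1, ite_self]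
        have hik : i + k ≤ l.length := by
          have := h1; push_cast at this; omega
        rw [pv_body2_eq l i k hk hik]
        set s' := l.take i ++ ((l.drop i).take k).reverse ++ l.drop (i + k) with hs'
        have hlen1 : (l.take i).length = i := by simp; omega
        have hlen2 : (((l.drop i).take k).reverse).length = k := by simp; omega
        have hlen' : s'.length = l.length := by rw [hs']; simp; omega
        have hcast : (i : Int) + (k : Int) * 2 = ((i + k * 2 : Nat) : Int) := by push_cast; ring
        rw [hcast, ih s' (i + k * 2) (by omega)]
        have htake : s'.take (i + k * 2) =
            l.take i ++ ((l.drop i).take k).reverse ++ (l.drop (i + k)).take k := by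
          rw [hs', List.append_assoc, List.take_append, List.take_append, hlen1, hlen2]
          rw [List.take_of_length_le (show (l.take i).length ≤ i + k * 2 by omega)]
          rw [List.take_of_length_le
            (show (((l.drop i).take k).reverse).length ≤ i + k * 2 - i by omega)]
          rw [show i + k * 2 - i - k = k by omega]
          simp [List.append_assoc]
        have hdrop : s'.drop (i + k * 2) = l.drop (i + k * 2) := by
          rw [hs', List.append_assoc, List.drop_append, List.drop_append, hlen1, hlen2]
          rw [List.drop_eq_nil_of_le (show (l.take i).length ≤ i + k * 2 by omega)]
          rw [List.drop_eq_nil_of_le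
            (show (((l.drop i).take k).reverse).length ≤ i + k * 2 - i by omega)]
          simp only [List.nil_append]
          rw [List.drop_drop]
          congr 1
          omega
        rw [htake, hdrop]
        rw [pv_chunks_cons k (l.drop i) (by omega) (by simp; try omega)]
        have e1 : (l.drop i).drop k = l.drop (i + k) := by rw [List.drop_drop]
        have e2 : (l.drop i).drop (2 * k) = l.drop (i + k * 2) := by rw [List.drop_drop]; try (congr 1; omega)
        rw [e1, e2]
        simp [List.append_assoc]
    · rw [if_neg hin]
      have hle : l.length ≤ i := by exact_mod_cast not_lt.mp hin
      rw [List.take_of_length_le hle, List.drop_eq_nil_of_le hle, pv_chunks_nil]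
      simp

def pvPhi (l : List Char) (k : Int) (i : Int) : Char :=
  let n : Int := l.length
  let rng := 2 * k
  let b := PySem.Int.floordiv i rng * rng
  let r := min k (n - b)
  let o := i - b
  if o < r then PySem.List.pyGetD l (b + r - 1 - o) ' '
  else PySem.List.pyGetD l i ' '

theorem pv_map_rev (l : List Char) (r : Nat) (hr : r ≤ l.length) (d : Char) :
    (PySem.List.pyRange 0 (r : Int) 1).map (fun i => PySem.List.pyGetD l ((r : Int) - 1 - i) d)
      = (l.take r).reverse := by
  rw [PySem.List.pyRange_one]
  apply List.ext_getElem
  · simp; omega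
  intro m h1 h2
  simp only [List.getElem_map, List.getElem_range, List.length_map, List.length_range] at h1 ⊢
  have hm : m < r := by simpa using h1
  rw [PySem.List.pyGetD_eq_getElem _ _ (by push_cast; omega) (by push_cast; omega)]
  rw [List.getElem_reverse, List.getElem_take]
  have hx : ((r : Int) - 1 - (0 + (m : Int))).toNat = (List.take r l).length - 1 - m := by
    simp only [List.length_take]
    omega
  simp [Nat.min_eq_left hr, hx]

theorem pv_map_slice (l : List Char) (a b : Nat) (hab : a ≤ b) (hb : b ≤ l.length) (d : Char) :
    (PySem.List.pyRange (a : Int) (b : Int) 1).map (fun i => PySem.List.pyGetD l i d)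
      = (l.drop a).take (b - a) := by
  rw [PySem.List.pyRange_one]
  apply List.ext_getElem
  · simp; omega
  intro m h1 h2
  simp only [List.getElem_map, List.getElem_range, List.length_map, List.length_range] at h1 ⊢
  have hm : m < b - a := by simpa using h1
  rw [PySem.List.pyGetD_eq_getElem _ _ (by push_cast; omega) (by push_cast; omega)]
  rw [List.getElem_take, List.getElem_drop]
  have hx : ((a : Int) + (m : Int)).toNat = a + m := by omega
  simp [hx]

theorem pv_phi_inblock (l : List Char) (k : Nat) (hk : 1 ≤ k) (i : Int)
    (h0 : 0 ≤ i) (hi : i < 2 * (k : Int)) :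
    PySem.Int.floordiv i (2 * (k : Int)) = 0 := by
  rw [PySem.Int.floordiv_eq_ediv_of_pos (by push_cast; omega)]
  exact Int.ediv_eq_zero_of_lt h0 hi

theorem pv_phi_shift (l : List Char) (k j : Nat) (hk : 1 ≤ k) (hj : 2 * k + j < l.length) :
    pvPhi l (k : Int) (2 * (k : Int) + (j : Int)) = pvPhi (l.drop (2 * k)) (k : Int) (j : Int) := by
  have h2k : (0 : Int) < 2 * (k : Int) := by push_cast; omega
  have hd : PySem.Int.floordiv (2 * (k : Int) + (j : Int)) (2 * (k : Int))
      = PySem.Int.floordiv (j : Int) (2 * (k : Int)) + 1 := by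
    rw [PySem.Int.floordiv_eq_ediv_of_pos h2k, PySem.Int.floordiv_eq_ediv_of_pos h2k]
    rw [show 2 * (k : Int) + (j : Int) = (j : Int) + 1 * (2 * (k : Int)) by ring,
      Int.add_mul_ediv_right _ _ (ne_of_gt h2k)]
  have hq0 : 0 ≤ PySem.Int.floordiv (j : Int) (2 * (k : Int)) := by
    rw [PySem.Int.floordiv_eq_ediv_of_pos h2k]
    exact Int.ediv_nonneg (by positivity) (by positivity)
  have hqle : PySem.Int.floordiv (j : Int) (2 * (k : Int)) * (2 * (k : Int)) ≤ (j : Int) := by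
    rw [PySem.Int.floordiv_eq_ediv_of_pos h2k]
    exact Int.ediv_mul_le _ (by omega)
  have hn' : ((l.drop (2 * k)).length : Int) = (l.length : Int) - 2 * (k : Int) := by
    simp; push_cast; omega
  simp only [pvPhi, hd]
  set q := PySem.Int.floordiv (j : Int) (2 * (k : Int)) with hqdef
  have hb : (q + 1) * (2 * (k : Int)) = q * (2 * (k : Int)) + 2 * (k : Int) := by ring
  rw [hb, hn']
  have hcond : ∀ (P : Prop), P = P := fun _ => rfl
  have harith1 : (l.length : Int) - (q * (2 * (k : Int)) + 2 * (k : Int))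
      = (l.length : Int) - 2 * (k : Int) - q * (2 * (k : Int)) := by ring
  have harith2 : 2 * (k : Int) + (j : Int) - (q * (2 * (k : Int)) + 2 * (k : Int))
      = (j : Int) - q * (2 * (k : Int)) := by ring
  rw [harith1, harith2]
  set b' := q * (2 * (k : Int)) with hb'def
  have hb'0 : 0 ≤ b' := by positivity
  have hb'j : b' ≤ (j : Int) := hqle
  set r := min (k : Int) ((l.length : Int) - 2 * (k : Int) - b') with hrdef
  have hr1 : b' + r ≤ (l.length : Int) - 2 * (k : Int) := by
    have : (j : Int) < (l.length : Int) - 2 * (k : Int) := by push_cast; omega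
    simp only [hrdef]
    omega
  split_ifs with hc
  · -- reversed span
    have hrpos : 0 < r := by omega
    have hx0 : 0 ≤ b' + r - 1 - ((j : Int) - b') := by omega
    have hx1 : b' + r - 1 - ((j : Int) - b') < (l.length : Int) - 2 * (k : Int) := by omega
    rw [PySem.List.pyGetD_eq_getElem _ _ (by omega) (by omega)]
    rw [PySem.List.pyGetD_eq_getElem _ _ hx0 (by rw [← hn'] at hx1; exact hx1)]
    rw [List.getElem_drop]
    congr 1
    omega
  · rw [PySem.List.pyGetD_eq_getElem _ _ (by positivity) (by push_cast; omega)]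
    rw [PySem.List.pyGetD_eq_getElem _ _ (by positivity) (by rw [hn']; push_cast; omega)]
    rw [List.getElem_drop]
    have hx : (2 * (k : Int) + (j : Int)).toNat = 2 * k + j := by omega
    simp [hx]

theorem pv_mapB_eq (k : Nat) (hk : 1 ≤ k) :
    ∀ (n : Nat) (l : List Char), l.length = n →
    (PySem.List.pyRange 0 (l.length : Int) 1).map (pvPhi l (k : Int)) = pvChunks k l := by
  intro n
  induction n using Nat.strong_induction_on with
  | _ n IH =>
  intro l hn
  by_cases hl : l = []
  · subst hl
    rw [PySem.List.pyRange_one_eq_nil (by simp), pv_chunks_nil]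
    rfl
  · have hNpos : 0 < l.length := List.length_pos_iff.mpr hl
    set N := l.length with hN
    set r0 := min k N with hr0
    set m := min (2 * k) N with hm
    have hr0N : r0 ≤ N := by omega
    have hr0m : r0 ≤ m := by omega
    have hmN : m ≤ N := by omega
    rw [PySem.List.pyRange_one_append 0 (m : Int) (N : Int) (by positivity) (by exact_mod_cast hmN)]
    rw [PySem.List.pyRange_one_append 0 (r0 : Int) (m : Int) (by positivity) (by exact_mod_cast hr0m)]
    rw [List.map_append, List.map_append]
    have hP1 : (PySem.List.pyRange 0 (r0 : Int) 1).map (pvPhi l (k : Int)) = (l.take k).reverse := by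
      rw [List.map_congr_left (g := fun i => PySem.List.pyGetD l ((r0 : Int) - 1 - i) ' ') ?_]
      · rw [pv_map_rev l r0 hr0N]
        congr 1
        by_cases h : k ≤ N
        · rw [hr0, Nat.min_eq_left h]
        · rw [hr0, Nat.min_eq_right (by omega), hN, List.take_length,
            List.take_of_length_le (by omega)]
      · intro i hi
        rw [PySem.List.mem_pyRange_one] at hi
        simp only [pvPhi]
        rw [pv_phi_inblock l k hk i hi.1 (by push_cast; omega), zero_mul]
        rw [show min (k : Int) ((l.length : Int) - 0) = (r0 : Int) by push_cast; omega]
        rw [if_pos (by omega)]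
        congr 1
        ring
    have hP2 : (PySem.List.pyRange (r0 : Int) (m : Int) 1).map (pvPhi l (k : Int))
        = (l.drop k).take k := by
      rw [List.map_congr_left (g := fun i => PySem.List.pyGetD l i ' ') ?_]
      · rw [pv_map_slice l r0 m hr0m hmN]
        by_cases h : N ≤ k
        · rw [List.drop_eq_nil_of_le (by omega), List.drop_eq_nil_of_le (by omega)]
          simp
        · by_cases h2 : N ≤ 2 * k
          · rw [show r0 = k by omega, show m = N by omega]
            rw [List.take_of_length_le (by simp; omega), List.take_of_length_le (by simp; omega)]
          · rw [show r0 = k by omega, show m = 2 * k by omega,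
              show 2 * k - k = k by omega]
      · intro i hi
        rw [PySem.List.mem_pyRange_one] at hi
        simp only [pvPhi]
        rw [pv_phi_inblock l k hk i (by push_cast at hi ⊢; omega) (by push_cast at hi ⊢; omega),
          zero_mul]
        rw [show min (k : Int) ((l.length : Int) - 0) = (r0 : Int) by push_cast; omega]
        rw [if_neg (by push_cast at hi ⊢; omega)]
    have hP3 : (PySem.List.pyRange (m : Int) (N : Int) 1).map (pvPhi l (k : Int))
        = pvChunks k (l.drop (2 * k)) := by
      by_cases h2 : N ≤ 2 * k
      · rw [show m = N by omega, PySem.List.pyRange_one_eq_nil (by omega),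
          List.drop_eq_nil_of_le (by omega), pv_chunks_nil]
        rfl
      · have hmk : m = 2 * k := by omega
        have hIH := IH (N - 2 * k) (by omega) (l.drop (2 * k)) (by simp; omega)
        have hlen' : ((l.drop (2 * k)).length : Int) = (N : Int) - 2 * (k : Int) := by
          simp; push_cast; omega
        rw [hlen'] at hIH
        rw [hmk, ← hIH]
        rw [PySem.List.pyRange_one ((2 * k : Nat) : Int) (N : Int),
          PySem.List.pyRange_one 0 ((N : Int) - 2 * (k : Int))]
        rw [List.map_map, List.map_map]
        rw [show (N : Int) - 2 * (k : Int) - 0 = (N : Int) - ((2 * k : Nat) : Int) by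
          push_cast; ring]
        apply List.map_congr_left
        intro c hc
        rw [List.mem_range] at hc
        have hc' : c < N - 2 * k := by
          have : ((N : Int) - (2 * k : Nat)).toNat = N - 2 * k := by push_cast; omega
          omega
        simp only [Function.comp_apply]
        have := pv_phi_shift l k c hk (by omega)
        rw [show ((2 * k : Nat) : Int) + (c : Int) = 2 * (k : Int) + (c : Int) by push_cast; ring]
        rw [this]
        congr 1
        omega
    rw [hP1, hP2, hP3, pv_chunks_cons k l (by omega) hl]

-- ===== VERDICT (by name: the statement is the Claim_ definition above) =====
theorem reverseStr_PASSED_spec : Claim_equal_reverseStr_PASSED := by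
  intro s k hdom hpre
  unfold Spec_reverseStr_PASSED
  by_cases h1 : ((s.toList.length : Int)) = 1
  · have hA : reverseStr_PASSED s k = s := by
      unfold reverseStr_PASSED; rw [PySem.Str.len_eq, if_pos h1]
    have hB : reverseStr_PASSED_alt s k = s := by
      unfold reverseStr_PASSED_alt; rw [PySem.Str.len_eq, if_pos (by omega)]
    rw [hA, hB]
  · by_cases h0 : s.toList.length = 0
    · have hl : s.toList = [] := List.length_eq_zero_iff.mp h0
      have hA : reverseStr_PASSED s k = s := by
        unfold reverseStr_PASSED
        rw [PySem.Str.len_eq, if_neg h1, hl]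
        simp only [List.length_nil, Nat.zero_add]
        rw [revA_loop]
        rw [if_neg (by simp)]
        rw [← hl, String.ofList_toList]
      have hB : reverseStr_PASSED_alt s k = s := by
        unfold reverseStr_PASSED_alt; rw [PySem.Str.len_eq, if_pos (by omega)]
      rw [hA, hB]
    · have hn2 : 2 ≤ s.toList.length := by omega
      have hk1 : 1 ≤ k := by
        rcases hpre with h | h
        · exact h
        · omega
      have hkcast : ((k.toNat : Nat) : Int) = k := Int.toNat_of_nonneg (by omega)
      have hA : reverseStr_PASSED s k = String.ofList (pvChunks k.toNat s.toList) := by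
        unfold reverseStr_PASSED
        rw [PySem.Str.len_eq, if_neg h1]
        have h := pv_loopA_eq k.toNat (by omega) (s.toList.length + 1) s.toList 0 (by omega)
        rw [show ((0 : Nat) : Int) = 0 from rfl, hkcast] at h
        rw [h, List.take_zero, List.drop_zero, List.nil_append]
      have hBmap := pv_mapB_eq k.toNat (by omega) s.toList.length s.toList rfl
      rw [hkcast] at hBmap
      have hB : reverseStr_PASSED_alt s k = String.ofList (pvChunks k.toNat s.toList) := by
        have hstep : reverseStr_PASSED_alt s k
            = String.ofList ((PySem.List.pyRange 0 ((s.toList.length : Nat) : Int) 1).map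
                (pvPhi s.toList k)) := by
          unfold reverseStr_PASSED_alt
          rw [PySem.Str.len_eq, if_neg (by push_cast; omega)]
          rfl
        rw [hstep, hBmap]
      rw [hA, hB]
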